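/-
  GENERATED by c/gen_symbols.py from gif.sym (the PROGRAM only (the base is in the shared library)) — do not edit; re-run the script when the image is re-linked.

  `Symbols`: one number per symbol of the image. `symbols`: this build. `Symbols.rt`: the runtime's entry points as the
  parameter record of Asan/Runtime.lean. `Symbols.image`: the `Image` for given file bytes.
-/
import Asan.Runtime
import ProgX.Base.Symbols
import ProgX.Start
namespace Gif

/-- The symbols of the image (`nm`): functions, named objects, section marks. -/
structure Symbols where
  /-- `DGifGetPrefixChar`: function (static), 85 bytes -/
  DGifGetPrefixChar : Nat
  /-- `digest_byte`: function (static), 22 bytes -/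
  digest_byte : Nat
  /-- `digest_int`: function (static), 49 bytes -/
  digest_int : Nat
  /-- `digest_bytes`: function (static), 73 bytes -/
  digest_bytes : Nat
  /-- `digest_map`: function (static), 228 bytes -/
  digest_map : Nat
  /-- `digest_extensions`: function (static), 162 bytes -/
  digest_extensions : Nat
  /-- `digest_file`: function (static), 590 bytes -/
  digest_file : Nat
  /-- `mem_read`: function (static), 131 bytes -/
  mem_read : Nat
  /-- `strncmp`: function, 120 bytes -/
  strncmp : Nat
  /-- `fread`: function, 2 bytes -/
  fread : Nat
  /-- `InternalRead`: function (static), 111 bytes -/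
  InternalRead : Nat
  /-- `DGifGetWord`: function (static), 162 bytes -/
  DGifGetWord : Nat
  /-- `DGifSetupDecompress`: function (static), 468 bytes -/
  DGifSetupDecompress : Nat
  /-- `DGifBufferedInput`: function (static), 294 bytes -/
  DGifBufferedInput : Nat
  /-- `DGifDecompressInput`: function (static), 413 bytes -/
  DGifDecompressInput : Nat
  /-- `DGifDecompressLine`: function (static), 1505 bytes -/
  DGifDecompressLine : Nat
  /-- `fclose`: function, 2 bytes -/
  fclose : Nat
  /-- `openbsd_reallocarray`: function, 112 bytes -/
  openbsd_reallocarray : Nat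
  /-- `GifBitSize`: function, 29 bytes -/
  GifBitSize : Nat
  /-- `GifMakeMapObject`: function, 190 bytes -/
  GifMakeMapObject : Nat
  /-- `GifFreeMapObject`: function, 38 bytes -/
  GifFreeMapObject : Nat
  /-- `GifAddExtensionBlock`: function, 298 bytes -/
  GifAddExtensionBlock : Nat
  /-- `GifFreeExtensions`: function, 146 bytes -/
  GifFreeExtensions : Nat
  /-- `GifFreeSavedImages`: function, 198 bytes -/
  GifFreeSavedImages : Nat
  /-- `DGifGetScreenDesc`: function, 757 bytes -/
  DGifGetScreenDesc : Nat
  /-- `DGifOpen`: function, 634 bytes -/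
  DGifOpen : Nat
  /-- `DGifGetRecordType`: function, 312 bytes -/
  DGifGetRecordType : Nat
  /-- `DGifGetImageHeader`: function, 803 bytes -/
  DGifGetImageHeader : Nat
  /-- `DGifGetImageDesc`: function, 472 bytes -/
  DGifGetImageDesc : Nat
  /-- `DGifGetExtensionNext`: function, 295 bytes -/
  DGifGetExtensionNext : Nat
  /-- `DGifGetExtension`: function, 231 bytes -/
  DGifGetExtension : Nat
  /-- `DGifCloseFile`: function, 360 bytes -/
  DGifCloseFile : Nat
  /-- `DGifGetCodeNext`: function, 326 bytes -/
  DGifGetCodeNext : Nat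
  /-- `DGifGetLine`: function, 308 bytes -/
  DGifGetLine : Nat
  /-- `DGifDecreaseImageCounter`: function, 271 bytes -/
  DGifDecreaseImageCounter : Nat
  /-- `DGifSlurp`: function, 892 bytes -/
  DGifSlurp : Nat
  /-- `gif_decode`: function, 698 bytes -/
  gif_decode : Nat
  /-- `_sub_I_65535_1`: function (static), 24 bytes -/
  sub_I_65535_1 : Nat
  /-- `__text_end`: function -/
  text_end : Nat
  /-- `__rodata_start`: read-only mark / object -/
  rodata_start : Nat
  /-- `InterlacedJumps.0`: read-only object (static), 16 bytes -/
  InterlacedJumps_0 : Nat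
  /-- `InterlacedOffset.1`: read-only object (static), 16 bytes -/
  InterlacedOffset_1 : Nat
  /-- `CodeMasks.2`: read-only object (static), 26 bytes -/
  CodeMasks_2 : Nat
  /-- `__rodata_end`: read-only mark / object -/
  rodata_end : Nat
  /-- `__data_start`: data mark / object -/
  data_start : Nat
  /-- `__data_end`: data mark / object -/
  data_end : Nat
  /-- `__bss_start`: bss mark / object -/
  bss_start : Nat
  /-- `errno`: bss mark / object, 4 bytes -/
  errno : Nat
  /-- `__bss_end`: bss mark / object -/
  bss_end : Nat
  /-- `__image_end`: bss mark / object -/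
  image_end : Nat

/-- The addresses of this build (gif.sym). -/
def symbols : Symbols where
  DGifGetPrefixChar := 0x105160
  digest_byte := 0x105240
  digest_int := 0x1052e0
  digest_bytes := 0x1053a0
  digest_map := 0x105480
  digest_extensions := 0x105660
  digest_file := 0x1057c0
  mem_read := 0x105c60
  strncmp := 0x105d80
  fread := 0x105e80
  InternalRead := 0x105f20
  DGifGetWord := 0x106020
  DGifSetupDecompress := 0x106180
  DGifBufferedInput := 0x106540
  DGifDecompressInput := 0x1067a0
  DGifDecompressLine := 0x106ae0
  fclose := 0x1076c0
  openbsd_reallocarray := 0x107760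
  GifBitSize := 0x107860
  GifMakeMapObject := 0x107900
  GifFreeMapObject := 0x107a80
  GifAddExtensionBlock := 0x107b40
  GifFreeExtensions := 0x107da0
  GifFreeSavedImages := 0x107ee0
  DGifGetScreenDesc := 0x108080
  DGifOpen := 0x108680
  DGifGetRecordType := 0x108b80
  DGifGetImageHeader := 0x108e00
  DGifGetImageDesc := 0x109460
  DGifGetExtensionNext := 0x109820
  DGifGetExtension := 0x109a80
  DGifCloseFile := 0x109c60
  DGifGetCodeNext := 0x109f40
  DGifGetLine := 0x10a1e0
  DGifDecreaseImageCounter := 0x10a460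
  DGifSlurp := 0x10a680
  gif_decode := 0x10ad80
  sub_I_65535_1 := 0x10b300
  text_end := 0x10b3a0
  rodata_start := 0x141100
  InterlacedJumps_0 := 0x141300
  InterlacedOffset_1 := 0x141340
  CodeMasks_2 := 0x141380
  rodata_end := 0x141a00
  data_start := 0x141e00
  data_end := 0x142100
  bss_start := 0x142300
  errno := 0x142300
  bss_end := 0x142340
  image_end := 0x142340

/-- The runtime's entry points, for the contracts of Asan/Runtime.lean. -/
def Symbols.rt (S : Symbols) : Asan.RtSymbols where
  report := UInt64.ofNat ProgX.Base.symbols.asan_report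
  rangeBad := UInt64.ofNat ProgX.Base.symbols.range_bad
  load1 := UInt64.ofNat ProgX.Base.symbols.asan_load1_noabort
  store1 := UInt64.ofNat ProgX.Base.symbols.asan_store1_noabort
  load2 := UInt64.ofNat ProgX.Base.symbols.asan_load2_noabort
  store2 := UInt64.ofNat ProgX.Base.symbols.asan_store2_noabort
  load4 := UInt64.ofNat ProgX.Base.symbols.asan_load4_noabort
  store4 := UInt64.ofNat ProgX.Base.symbols.asan_store4_noabort
  load8 := UInt64.ofNat ProgX.Base.symbols.asan_load8_noabort
  store8 := UInt64.ofNat ProgX.Base.symbols.asan_store8_noabort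
  load16 := UInt64.ofNat ProgX.Base.symbols.asan_load16_noabort
  store16 := UInt64.ofNat ProgX.Base.symbols.asan_store16_noabort
  storeN := UInt64.ofNat ProgX.Base.symbols.asan_storeN_noabort
  arenaUnpoison := UInt64.ofNat ProgX.Base.symbols.arena_unpoison
  arenaPoison := UInt64.ofNat ProgX.Base.symbols.arena_poison
  registerGlobals := UInt64.ofNat ProgX.Base.symbols.asan_register_globals
  ctor := UInt64.ofNat S.sub_I_65535_1
  runCtors := UInt64.ofNat ProgX.Base.symbols.run_ctors
  initArrayStart := ProgX.Base.symbols.init_array_start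
  initArrayEnd := ProgX.Base.symbols.init_array_end

/-- The `Image` of ProgX/Start.lean for the file bytes `bytes` (gif.bin) and these symbols. -/
def Symbols.image (S : Symbols) (bytes : Array UInt8) : ProgX.Image where
  bytes := bytes
  imageEnd := S.image_end
  textEnd := ProgX.Base.symbols.text_cap
  entry := UInt64.ofNat ProgX.Base.symbols.start
  exit := UInt64.ofNat ProgX.Base.symbols.prog_exit
  report := UInt64.ofNat ProgX.Base.symbols.asan_report

end Gif
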